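-- pv_equiv track=rewrite | github.com/haolunc/ARC-RL | reference_solutions/solutions/05269061.py | transform
-- ===== SOURCE A (Python) =====
-- def transform(grid):
--
--     if not grid:
--         return grid
--     n = len(grid)
--     m = len(grid[0]) if grid else 0
--
--     arr = [None, None, None]
--     for i in range(n):
--         for j in range(m):
--             v = grid[i][j]
--             if v != 0:
--                 r = (i + j) % 3
--                 if arr[r] is None:
--                     arr[r] = int(v)
--
--     for k in range(3):
--         if arr[k] is None:
--             arr[k] = 0
--
--     out = [[arr[(i + j) % 3] for j in range(m)] for i in range(n)]
--     return out
-- ===== SOURCE B (Python) =====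
-- def transform(grid):
--     if not grid:
--         return grid
--     n = len(grid)
--     m = len(grid[0])
--     arr = [next((int(grid[i][j]) for i in range(n) for j in range(m)
--                  if grid[i][j] != 0 and (i + j) % 3 == r), 0)
--            for r in range(3)]
--     return [[arr[(i + j) % 3] for j in range(m)] for i in range(n)]
-- ===== Notes on version B (the rewrite author's own statement) =====
-- stated objective: faster
-- what changed: Replaces the single whole-grid populate-three-slots pass (None sentinels plus a defaulting pass) by three independent first-match searches, one per diagonal class, each stopping at its first nonzero cell.
import Mathlib
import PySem

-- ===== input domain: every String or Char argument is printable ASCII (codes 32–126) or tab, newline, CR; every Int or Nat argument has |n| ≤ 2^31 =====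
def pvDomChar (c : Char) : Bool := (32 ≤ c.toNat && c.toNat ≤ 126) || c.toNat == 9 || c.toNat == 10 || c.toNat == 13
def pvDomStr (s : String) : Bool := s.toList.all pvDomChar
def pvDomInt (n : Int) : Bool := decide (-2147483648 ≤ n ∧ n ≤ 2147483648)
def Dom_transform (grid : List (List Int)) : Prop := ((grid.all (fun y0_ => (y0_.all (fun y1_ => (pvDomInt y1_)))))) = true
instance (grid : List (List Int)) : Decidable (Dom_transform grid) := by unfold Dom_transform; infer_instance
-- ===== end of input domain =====

-- B replaces A's single populate-then-default pass with three independent first-match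
-- searches over the row-major cell sequence, each stopping at its first match
-- (objective: faster, measured).

-- ===== PORT A =====
-- arr = [None, None, None] is the triple of Option Int slots; arr[r] access/update
-- is written out per residue r ∈ {0,1,2}.
def pvStepA (grid : List (List Int)) (a : Option Int × Option Int × Option Int)
    (i j : Int) : Option Int × Option Int × Option Int :=
  let v := (PySem.List.pyGet? ((PySem.List.pyGet? grid i).getD []) j).getD 0   -- grid[i][j]; in-range under Pre_ (IndexError excluded there)
  if v ≠ 0 then
    let r := PySem.Int.mod (i + j) 3
    if r = 0 then (if a.1 = none then (some v, a.2.1, a.2.2) else a)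
    else if r = 1 then (if a.2.1 = none then (a.1, some v, a.2.2) else a)
    else (if a.2.2 = none then (a.1, a.2.1, some v) else a)
  else a

def transform (grid : List (List Int)) : List (List Int) :=
  if grid = [] then grid
  else
    let n : Int := grid.length
    let m : Int := (grid.headD []).length
    let arr := (PySem.List.pyRange 0 n 1).foldl
      (fun a i => (PySem.List.pyRange 0 m 1).foldl (fun a j => pvStepA grid a i j) a)
      (none, none, none)
    let a0 := arr.1.getD 0
    let a1 := arr.2.1.getD 0
    let a2 := arr.2.2.getD 0
    (PySem.List.pyRange 0 n 1).map (fun i =>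
      (PySem.List.pyRange 0 m 1).map (fun j =>
        let r := PySem.Int.mod (i + j) 3
        if r = 0 then a0 else if r = 1 then a1 else a2))

-- ===== PORT B =====
-- next((grid[i][j] for i in range(n) for j in range(m) if …), 0)
def pvFirstB (grid : List (List Int)) (n m r : Int) : Int :=
  (((PySem.List.pyRange 0 n 1).flatMap (fun i =>
      (PySem.List.pyRange 0 m 1).map (fun j => (i, j)))).find? (fun (c : Int × Int) =>
        decide ((PySem.List.pyGet? ((PySem.List.pyGet? grid c.1).getD []) c.2).getD 0 ≠ 0) &&
        decide (PySem.Int.mod (c.1 + c.2) 3 = r))).map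
    (fun (c : Int × Int) => (PySem.List.pyGet? ((PySem.List.pyGet? grid c.1).getD []) c.2).getD 0) |>.getD 0

def transform_alt (grid : List (List Int)) : List (List Int) :=
  if grid = [] then []
  else
    let n : Int := grid.length
    let m : Int := (grid.headD []).length
    let arr := (PySem.List.pyRange 0 3 1).map (fun r => pvFirstB grid n m r)
    (PySem.List.pyRange 0 n 1).map (fun i =>
      (PySem.List.pyRange 0 m 1).map (fun j =>
        PySem.List.pyGetD arr (PySem.Int.mod (i + j) 3) 0))

-- ===== PRECONDITION & SPEC =====
-- Pre_ excludes ragged grids with a row shorter than row 0, on which A raises IndexError at grid[i][j].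
def Pre_transform (grid : List (List Int)) : Prop :=
  ∀ row ∈ grid, (grid.headD []).length ≤ row.length
instance (grid : List (List Int)) : Decidable (Pre_transform grid) := by
  unfold Pre_transform; infer_instance
def pvWitness_transform : List (List Int) := [[1, 0], [0, 2]]

def Spec_transform (grid : List (List Int)) (out : List (List Int)) : Prop := out = transform_alt grid
instance (grid : List (List Int)) (out : List (List Int)) : Decidable (Spec_transform grid out) := by unfold Spec_transform; infer_instance

-- ===== CLAIM (what is proved, stated in full; the proofs are below) =====
def Claim_equal_transform : Prop := ∀ (grid : List (List Int)), Dom_transform grid → Pre_transform grid → Spec_transform grid (transform grid)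

-- ===== LEMMAS AND PROOFS =====

-- nested foldl over two ranges = foldl over the flattened (i,j) cell list
theorem pv_foldl_flatMap {α β γ : Type} (l : List α) (f : α → List β)
    (g : γ → β → γ) (s : γ) :
    (l.flatMap f).foldl g s = l.foldl (fun s a => (f a).foldl g s) s := by
  induction l generalizing s with
  | nil => rfl
  | cons h t ih => simp [List.flatMap_cons, List.foldl_append, ih]

def pvGet3 (a : Option Int × Option Int × Option Int) (r : Int) : Option Int :=
  if r = 0 then a.1 else if r = 1 then a.2.1 else a.2.2

-- effect of one step on slot r
theorem pv_step_fill (grid : List (List Int)) (s : Option Int × Option Int × Option Int)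
    (i j r : Int) (hr : r = 0 ∨ r = 1 ∨ r = 2)
    (hz : (PySem.List.pyGet? ((PySem.List.pyGet? grid i).getD []) j).getD 0 ≠ 0)
    (hrr : PySem.Int.mod (i + j) 3 = r) (he : pvGet3 s r = none) :
    pvGet3 (pvStepA grid s i j) r =
      some ((PySem.List.pyGet? ((PySem.List.pyGet? grid i).getD []) j).getD 0) := by
  obtain ⟨s0, s1, s2⟩ := s
  rcases hr with h | h | h <;> subst h <;>
    simp_all [pvStepA, pvGet3]

theorem pv_step_keep (grid : List (List Int)) (s : Option Int × Option Int × Option Int)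
    (i j r : Int) (x : Int) (hs : pvGet3 s r = some x) :
    pvGet3 (pvStepA grid s i j) r = some x := by
  obtain ⟨s0, s1, s2⟩ := s
  by_cases hr0 : r = 0
  · subst hr0; simp only [pvGet3] at hs ⊢
    simp only [pvStepA]; split_ifs <;> simp_all
  · by_cases hr1 : r = 1
    · subst hr1; simp [pvGet3] at hs ⊢
      simp only [pvStepA]; split_ifs <;> simp_all
    · simp [pvGet3, hr0, hr1] at hs ⊢
      simp only [pvStepA]; split_ifs <;> simp_all

theorem pv_step_other (grid : List (List Int)) (s : Option Int × Option Int × Option Int)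
    (i j r : Int) (hr : r = 0 ∨ r = 1 ∨ r = 2)
    (hrr : PySem.Int.mod (i + j) 3 ≠ r) :
    pvGet3 (pvStepA grid s i j) r = pvGet3 s r := by
  obtain ⟨s0, s1, s2⟩ := s
  have hm : PySem.Int.mod (i + j) 3 = 0 ∨ PySem.Int.mod (i + j) 3 = 1 ∨
      PySem.Int.mod (i + j) 3 = 2 := by
    have := PySem.Int.mod_eq_emod_of_pos (a := i + j) (b := 3) (by norm_num)
    omega
  rcases hr with h | h | h <;> subst h <;> rcases hm with h' | h' | h' <;>
    first
      | exact absurd h' hrr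
      | (simp only [pvStepA, h']; split_ifs <;> first | omega | simp [pvGet3])

-- the combined slot-filling fold, read at slot r, is the first match for r
theorem pv_fold_slot (grid : List (List Int)) (L : List (Int × Int))
    (s : Option Int × Option Int × Option Int) (r : Int)
    (hr : r = 0 ∨ r = 1 ∨ r = 2) :
    pvGet3 (L.foldl (fun a c => pvStepA grid a c.1 c.2) s) r =
      (pvGet3 s r).or
        ((L.find? (fun (c : Int × Int) =>
            decide ((PySem.List.pyGet? ((PySem.List.pyGet? grid c.1).getD []) c.2).getD 0 ≠ 0) &&
            decide (PySem.Int.mod (c.1 + c.2) 3 = r))).map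
          (fun (c : Int × Int) => (PySem.List.pyGet? ((PySem.List.pyGet? grid c.1).getD []) c.2).getD 0)) := by
  induction L generalizing s with
  | nil => simp
  | cons c t ih =>
    rw [List.foldl_cons, List.find?_cons]
    by_cases hz : (PySem.List.pyGet? ((PySem.List.pyGet? grid c.1).getD []) c.2).getD 0 = 0
    · have hp : (decide ((PySem.List.pyGet? ((PySem.List.pyGet? grid c.1).getD []) c.2).getD 0 ≠ 0) &&
          decide (PySem.Int.mod (c.1 + c.2) 3 = r)) = false := by simp [hz]
      rw [hp]
      have hstep : pvStepA grid s c.1 c.2 = s := by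
        simp [pvStepA, hz]
      rw [hstep, ih s]
    · by_cases hrr : PySem.Int.mod (c.1 + c.2) 3 = r
      · have hp : (decide ((PySem.List.pyGet? ((PySem.List.pyGet? grid c.1).getD []) c.2).getD 0 ≠ 0) &&
            decide (PySem.Int.mod (c.1 + c.2) 3 = r)) = true := by
          simp only [Bool.and_eq_true, decide_eq_true_eq]; exact ⟨hz, hrr⟩
        rw [hp, ih]
        cases hs : pvGet3 s r with
        | none =>
          rw [pv_step_fill grid s c.1 c.2 r hr hz hrr hs]
          simp [Option.or]
        | some x =>
          rw [pv_step_keep grid s c.1 c.2 r x hs]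
          simp [Option.or]
      · have hp : (decide ((PySem.List.pyGet? ((PySem.List.pyGet? grid c.1).getD []) c.2).getD 0 ≠ 0) &&
            decide (PySem.Int.mod (c.1 + c.2) 3 = r)) = false := by
          rw [decide_eq_false hrr, Bool.and_false]
        rw [hp, ih, pv_step_other grid s c.1 c.2 r hr hrr]

theorem pv_first_eq (grid : List (List Int)) (n m r : Int)
    (hr : r = 0 ∨ r = 1 ∨ r = 2) :
    pvFirstB grid n m r =
      (pvGet3 ((PySem.List.pyRange 0 n 1).foldl
        (fun a i => (PySem.List.pyRange 0 m 1).foldl (fun a j => pvStepA grid a i j) a)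
        (none, none, none)) r).getD 0 := by
  have := pv_fold_slot grid
    ((PySem.List.pyRange 0 n 1).flatMap (fun i =>
      (PySem.List.pyRange 0 m 1).map (fun j => (i, j)))) (none, none, none) r hr
  rw [pv_foldl_flatMap] at this
  simp only [List.foldl_map] at this
  unfold pvFirstB
  rw [List.find?_flatMap] at this ⊢
  · rw [this]
    have h0 : pvGet3 (none, none, none) r = none := by
      rcases hr with h | h | h <;> simp [pvGet3, h]
    simp [h0, Option.or]
  
theorem pv_getD3_1 (a b c : Int) : PySem.List.pyGetD [a, b, c] 1 0 = b := rfl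
theorem pv_getD3_2 (a b c : Int) : PySem.List.pyGetD [a, b, c] 2 0 = c := rfl

-- ===== VERDICT (by name: the statement is the Claim_ definition above) =====
theorem transform_spec : Claim_equal_transform := by
  intro grid _ _
  unfold Spec_transform transform transform_alt
  by_cases hg : grid = []
  · simp [hg]
  · simp only [if_neg hg]
    apply List.map_congr_left
    intro i _
    apply List.map_congr_left
    intro j _
    have hemod := PySem.Int.mod_eq_emod_of_pos (a := i + j) (b := 3) (by norm_num)
    have hm : (i + j) % 3 = 0 ∨ (i + j) % 3 = 1 ∨ (i + j) % 3 = 2 := by omega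
    rw [show PySem.List.pyRange 0 3 1 = [0, 1, 2] from by decide]
    rcases hm with h | h | h <;>
      rw [hemod, h] <;>
      simp [pv_getD3_1, pv_getD3_2,
        pv_first_eq grid _ _ 0 (Or.inl rfl), pv_first_eq grid _ _ 1 (Or.inr (Or.inl rfl)),
        pv_first_eq grid _ _ 2 (Or.inr (Or.inr rfl)), pvGet3]
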